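-- pv_equiv track=rewrite | github.com/Richardmsbr/cybersecurity-architecture | projects/api-shield/src/api_shield/engine.py | _generate_block_reason
-- ===== SOURCE A (Python) =====
-- from typing import Any, Dict, List, Optional, Tuple
--
-- def _generate_block_reason(signals: Dict[str, float]) -> str:
--     """Generate human-readable block reason from signals."""
--     reasons = []
--
--     if any("bola" in k for k in signals):
--         reasons.append("unauthorized resource access pattern")
--     if any("brute_force" in k for k in signals):
--         reasons.append("authentication attack detected")
--     if any("credential_stuffing" in k for k in signals):
--         reasons.append("credential stuffing attack")
--     if any("rate" in k and "limit" in k for k in signals):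
--         reasons.append("rate limit exceeded")
--     if any("bot" in k for k in signals):
--         reasons.append("automated attack pattern")
--
--     if not reasons:
--         reasons.append("suspicious activity detected")
--
--     return "Blocked: " + ", ".join(reasons)
-- ===== SOURCE B (Python) =====
-- def _generate_block_reason(signals):
--     """Single pass over the keys maintaining five flags, then fixed-order emission."""
--     bola = brute = cred = rate = bot = False
--     for k in signals:
--         bola = bola or ("bola" in k)
--         brute = brute or ("brute_force" in k)
--         cred = cred or ("credential_stuffing" in k)
--         rate = rate or ("rate" in k and "limit" in k)
--         bot = bot or ("bot" in k)
--     reasons = []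
--     if bola:
--         reasons.append("unauthorized resource access pattern")
--     if brute:
--         reasons.append("authentication attack detected")
--     if cred:
--         reasons.append("credential stuffing attack")
--     if rate:
--         reasons.append("rate limit exceeded")
--     if bot:
--         reasons.append("automated attack pattern")
--     if not reasons:
--         reasons = ["suspicious activity detected"]
--     return "Blocked: " + ", ".join(reasons)
-- ===== Notes on version B (the rewrite author's own statement) =====
-- stated objective: alternative
-- what changed: Replaces five separate any-scans over the signal keys with a single pass that maintains five boolean flags, then emits the messages in the same fixed order.
import Mathlib
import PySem

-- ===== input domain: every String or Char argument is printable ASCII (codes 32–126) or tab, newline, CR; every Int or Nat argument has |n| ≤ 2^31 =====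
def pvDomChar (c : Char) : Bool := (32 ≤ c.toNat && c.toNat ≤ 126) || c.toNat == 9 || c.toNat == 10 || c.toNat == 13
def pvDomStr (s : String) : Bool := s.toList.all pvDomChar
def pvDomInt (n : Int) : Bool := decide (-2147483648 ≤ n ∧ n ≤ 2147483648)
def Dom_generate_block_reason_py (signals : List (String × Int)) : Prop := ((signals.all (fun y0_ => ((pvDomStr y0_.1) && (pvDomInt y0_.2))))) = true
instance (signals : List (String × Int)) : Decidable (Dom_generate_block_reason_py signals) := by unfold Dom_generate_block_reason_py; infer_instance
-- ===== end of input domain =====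

-- ===== PORT A =====
-- Port of A: five separate `any` scans over the keys, appending a reason after each.
def generate_block_reason_py (signals : List (String × Int)) : String :=
  let reasons : List String := []
  let reasons := if signals.any (fun p => PySem.Str.isIn "bola" p.1) then
    reasons ++ ["unauthorized resource access pattern"] else reasons
  let reasons := if signals.any (fun p => PySem.Str.isIn "brute_force" p.1) then
    reasons ++ ["authentication attack detected"] else reasons
  let reasons := if signals.any (fun p => PySem.Str.isIn "credential_stuffing" p.1) then
    reasons ++ ["credential stuffing attack"] else reasons
  let reasons := if signals.any (fun p => PySem.Str.isIn "rate" p.1 && PySem.Str.isIn "limit" p.1) then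
    reasons ++ ["rate limit exceeded"] else reasons
  let reasons := if signals.any (fun p => PySem.Str.isIn "bot" p.1) then
    reasons ++ ["automated attack pattern"] else reasons
  let reasons := if reasons = [] then reasons ++ ["suspicious activity detected"] else reasons
  "Blocked: " ++ PySem.Str.join ", " reasons

-- ===== PORT B =====
-- Port of B: ONE pass over the keys maintaining five boolean flags, then fixed-order emission.
def generate_block_reason_py_alt (signals : List (String × Int)) : String :=
  let st : Bool × Bool × Bool × Bool × Bool := signals.foldl
    (fun st p =>
      (st.1 || PySem.Str.isIn "bola" p.1,
       st.2.1 || PySem.Str.isIn "brute_force" p.1,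
       st.2.2.1 || PySem.Str.isIn "credential_stuffing" p.1,
       st.2.2.2.1 || (PySem.Str.isIn "rate" p.1 && PySem.Str.isIn "limit" p.1),
       st.2.2.2.2 || PySem.Str.isIn "bot" p.1))
    (false, false, false, false, false)
  let reasons : List String := []
  let reasons := if st.1 then reasons ++ ["unauthorized resource access pattern"] else reasons
  let reasons := if st.2.1 then reasons ++ ["authentication attack detected"] else reasons
  let reasons := if st.2.2.1 then reasons ++ ["credential stuffing attack"] else reasons
  let reasons := if st.2.2.2.1 then reasons ++ ["rate limit exceeded"] else reasons
  let reasons := if st.2.2.2.2 then reasons ++ ["automated attack pattern"] else reasons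
  let reasons := if reasons = [] then ["suspicious activity detected"] else reasons
  "Blocked: " ++ PySem.Str.join ", " reasons

-- ===== PRECONDITION & SPEC =====
def Spec_generate_block_reason_py (signals : List (String × Int)) (out : String) : Prop := out = generate_block_reason_py_alt signals
instance (signals : List (String × Int)) (out : String) : Decidable (Spec_generate_block_reason_py signals out) := by unfold Spec_generate_block_reason_py; infer_instance

-- ===== CLAIM (what is proved, stated in full; the proofs are below) =====
def Claim_equal_generate_block_reason_py : Prop := ∀ (signals : List (String × Int)), Dom_generate_block_reason_py signals → Spec_generate_block_reason_py signals (generate_block_reason_py signals)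

-- ===== LEMMAS AND PROOFS =====
-- The single pass with five or-accumulated flags computes the five `any` values.
theorem fold5_eq_any (signals : List (String × Int)) (b1 b2 b3 b4 b5 : Bool) :
    signals.foldl
      (fun (st : Bool × Bool × Bool × Bool × Bool) p =>
        (st.1 || PySem.Str.isIn "bola" p.1,
         st.2.1 || PySem.Str.isIn "brute_force" p.1,
         st.2.2.1 || PySem.Str.isIn "credential_stuffing" p.1,
         st.2.2.2.1 || (PySem.Str.isIn "rate" p.1 && PySem.Str.isIn "limit" p.1),
         st.2.2.2.2 || PySem.Str.isIn "bot" p.1))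
      (b1, b2, b3, b4, b5)
    = (b1 || signals.any (fun p => PySem.Str.isIn "bola" p.1),
       b2 || signals.any (fun p => PySem.Str.isIn "brute_force" p.1),
       b3 || signals.any (fun p => PySem.Str.isIn "credential_stuffing" p.1),
       b4 || signals.any (fun p => PySem.Str.isIn "rate" p.1 && PySem.Str.isIn "limit" p.1),
       b5 || signals.any (fun p => PySem.Str.isIn "bot" p.1)) := by
  induction signals generalizing b1 b2 b3 b4 b5 with
  | nil => simp
  | cons hd tl ih => rw [List.foldl_cons, ih]; simp [Bool.or_assoc]

-- ===== VERDICT (by name: the statement is the Claim_ definition above) =====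
theorem generate_block_reason_py_spec : Claim_equal_generate_block_reason_py := by
  intro signals _
  unfold Spec_generate_block_reason_py generate_block_reason_py generate_block_reason_py_alt
  rw [fold5_eq_any]
  cases h1 : signals.any (fun p => PySem.Str.isIn "bola" p.1) <;>
  cases h2 : signals.any (fun p => PySem.Str.isIn "brute_force" p.1) <;>
  cases h3 : signals.any (fun p => PySem.Str.isIn "credential_stuffing" p.1) <;>
  cases h4 : signals.any (fun p => PySem.Str.isIn "rate" p.1 && PySem.Str.isIn "limit" p.1) <;>
  cases h5 : signals.any (fun p => PySem.Str.isIn "bot" p.1) <;> simp
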